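-- pv_equiv track=rewrite | github.com/qphat289/Staycation_website_EXE101 | app/utils/utils.py | get_rank_info
-- ===== SOURCE A (Python) =====
-- def get_rank_info(xp_current):
--     # Define rank thresholds and names
--     rank_thresholds = {
--         'Bronze': 0,
--         'Silver': 1000,
--         'Gold': 5000,
--         'Platium': 10000,
--         'Diamond': 20000
--     }
--
--     # Determine current rank
--     current_rank = 'Bronze'
--     for rank, threshold in rank_thresholds.items():
--         if xp_current >= threshold:
--             current_rank = rank
--
--     # Get experience points needed to reach the next rank
--     rank_values = list(rank_thresholds.values())
--     current_rank_index = list(rank_thresholds.keys()).index(current_rank)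
--
--     # Calculate how much more xp the user needs for the next rank
--     if current_rank_index + 1 < len(rank_values):
--         next_rank = list(rank_thresholds.keys())[current_rank_index + 1]
--         next_min = rank_values[current_rank_index + 1]
--     else:
--         next_rank = 'Diamond'
--         next_min = 0
--
--     return current_rank, xp_current, next_rank, next_min
-- ===== SOURCE B (Python) =====
-- def get_rank_info(xp_current):
--     names = ['Bronze', 'Silver', 'Gold', 'Platium', 'Diamond']
--     cutoffs = [0, 1000, 5000, 10000, 20000]
--     # hand-rolled bisect_right over the cutoff table
--     lo, hi = 0, len(cutoffs)
--     while lo < hi: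
--         mid = (lo + hi) // 2
--         if cutoffs[mid] <= xp_current:
--             lo = mid + 1
--         else:
--             hi = mid
--     idx = max(0, lo - 1)
--     if idx + 1 < len(names):
--         return names[idx], xp_current, names[idx + 1], cutoffs[idx + 1]
--     return names[idx], xp_current, 'Diamond', 0
-- ===== Notes on version B (the rewrite author's own statement) =====
-- stated objective: alternative
-- what changed: Replaces A's dict scan (last threshold met) plus list(...).index/keys/values re-materialisations with two parallel ordered lists and a hand-rolled bisect_right binary search whose clamped result directly indexes both tables.
import Mathlib
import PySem

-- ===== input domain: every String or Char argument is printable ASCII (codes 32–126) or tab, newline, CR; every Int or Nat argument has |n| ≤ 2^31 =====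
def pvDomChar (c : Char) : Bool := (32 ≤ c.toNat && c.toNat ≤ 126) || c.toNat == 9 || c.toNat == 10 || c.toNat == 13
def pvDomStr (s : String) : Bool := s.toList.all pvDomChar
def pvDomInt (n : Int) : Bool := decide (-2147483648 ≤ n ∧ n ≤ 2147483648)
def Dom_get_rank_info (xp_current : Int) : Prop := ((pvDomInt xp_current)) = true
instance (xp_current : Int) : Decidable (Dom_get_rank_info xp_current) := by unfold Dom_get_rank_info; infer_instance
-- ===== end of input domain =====

-- B replaces A's dict-scan-plus-.index with parallel ordered lists and a hand-rolled
-- binary search (bisect_right) over the cutoffs; objective: idiomatic/alternative, not timed faster.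

-- ===== PORT A =====
def get_rank_info (xp_current : Int) : String × Int × String × Int :=
  let rank_thresholds : PySem.Dict String Int :=
    PySem.Dict.ofList [("Bronze", 0), ("Silver", 1000), ("Gold", 5000),
                       ("Platium", 10000), ("Diamond", 20000)]
  -- for rank, threshold in rank_thresholds.items(): if xp_current >= threshold: current_rank = rank
  let current_rank : String :=
    rank_thresholds.items.foldl
      (fun cr p => if xp_current ≥ p.2 then p.1 else cr) "Bronze"
  let rank_values := PySem.Dict.values rank_thresholds
  -- .index never raises here: current_rank is always a key of the dict (getD 0 unreachable)
  let current_rank_index : Nat :=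
    (PySem.List.index? (PySem.Dict.keys rank_thresholds) current_rank).getD 0
  if (current_rank_index : Int) + 1 < (rank_values.length : Int) then
    -- in-range list indexing; getD default unreachable
    let next_rank := (PySem.List.pyGet? (PySem.Dict.keys rank_thresholds) ((current_rank_index : Int) + 1)).getD ""
    let next_min := (PySem.List.pyGet? rank_values ((current_rank_index : Int) + 1)).getD 0
    (current_rank, xp_current, next_rank, next_min)
  else
    (current_rank, xp_current, "Diamond", 0)

-- ===== PORT B =====
def pvNames : List String := ["Bronze", "Silver", "Gold", "Platium", "Diamond"]
def pvCutoffs : List Int := [0, 1000, 5000, 10000, 20000]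

-- while lo < hi: mid = (lo+hi)//2; if cutoffs[mid] <= xp: lo = mid+1 else hi = mid
def pvBisect (xp : Int) (lo hi : Nat) : Nat :=
  if lo < hi then
    let mid := (lo + hi) / 2
    if (PySem.List.pyGet? pvCutoffs (mid : Int)).getD 0 ≤ xp then
      pvBisect xp (mid + 1) hi
    else
      pvBisect xp lo mid
  else lo
termination_by hi - lo
decreasing_by all_goals omega

def get_rank_info_alt (xp_current : Int) : String × Int × String × Int :=
  let lo := pvBisect xp_current 0 pvCutoffs.length
  let idx : Nat := max 0 (lo - 1)
  if idx + 1 < pvNames.length then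
    ((PySem.List.pyGet? pvNames (idx : Int)).getD "", xp_current,
     (PySem.List.pyGet? pvNames ((idx : Int) + 1)).getD "",
     (PySem.List.pyGet? pvCutoffs ((idx : Int) + 1)).getD 0)
  else
    ((PySem.List.pyGet? pvNames (idx : Int)).getD "", xp_current, "Diamond", 0)

-- ===== PRECONDITION & SPEC =====
def Spec_get_rank_info (xp_current : Int) (out : String × Int × String × Int) : Prop := out = get_rank_info_alt xp_current
instance (xp_current : Int) (out : String × Int × String × Int) : Decidable (Spec_get_rank_info xp_current out) := by unfold Spec_get_rank_info; infer_instance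

-- ===== CLAIM (what is proved, stated in full; the proofs are below) =====
def Claim_equal_get_rank_info : Prop := ∀ (xp_current : Int), Dom_get_rank_info xp_current → Spec_get_rank_info xp_current (get_rank_info xp_current)

-- ===== LEMMAS AND PROOFS =====
lemma pvA_eval (xp : Int) :
    get_rank_info xp =
      if xp ≥ 20000 then ("Diamond", xp, "Diamond", 0)
      else if xp ≥ 10000 then ("Platium", xp, "Diamond", 20000)
      else if xp ≥ 5000 then ("Gold", xp, "Platium", 10000)
      else if xp ≥ 1000 then ("Silver", xp, "Gold", 5000)
      else ("Bronze", xp, "Silver", 1000) := by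
  have hi : (PySem.Dict.ofList [("Bronze", (0:Int)), ("Silver", 1000), ("Gold", 5000),
      ("Platium", 10000), ("Diamond", 20000)]).items
      = [("Bronze", (0:Int)), ("Silver", 1000), ("Gold", 5000), ("Platium", 10000), ("Diamond", 20000)] := rfl
  have hk : PySem.Dict.keys (PySem.Dict.ofList [("Bronze", (0:Int)), ("Silver", 1000), ("Gold", 5000),
      ("Platium", 10000), ("Diamond", 20000)])
      = ["Bronze", "Silver", "Gold", "Platium", "Diamond"] := rfl
  have hv : PySem.Dict.values (PySem.Dict.ofList [("Bronze", (0:Int)), ("Silver", 1000), ("Gold", 5000),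
      ("Platium", 10000), ("Diamond", 20000)])
      = [(0:Int), 1000, 5000, 10000, 20000] := rfl
  have e0 : (List.idxOf? "Bronze" ["Bronze", "Silver", "Gold", "Platium", "Diamond"]).getD 0 = 0 := by decide
  have e1 : (List.idxOf? "Silver" ["Bronze", "Silver", "Gold", "Platium", "Diamond"]).getD 0 = 1 := by decide
  have e2 : (List.idxOf? "Gold" ["Bronze", "Silver", "Gold", "Platium", "Diamond"]).getD 0 = 2 := by decide
  have e3 : (List.idxOf? "Platium" ["Bronze", "Silver", "Gold", "Platium", "Diamond"]).getD 0 = 3 := by decide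
  have e4 : (List.idxOf? "Diamond" ["Bronze", "Silver", "Gold", "Platium", "Diamond"]).getD 0 = 4 := by decide
  simp only [get_rank_info, hi, hk, hv, List.foldl]
  split_ifs <;> simp_all

lemma pvB_eval (xp : Int) :
    get_rank_info_alt xp =
      if xp ≥ 20000 then ("Diamond", xp, "Diamond", 0)
      else if xp ≥ 10000 then ("Platium", xp, "Diamond", 20000)
      else if xp ≥ 5000 then ("Gold", xp, "Platium", 10000)
      else if xp ≥ 1000 then ("Silver", xp, "Gold", 5000)
      else ("Bronze", xp, "Silver", 1000) := by
  by_cases h20 : 20000 ≤ xp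
  · simp [get_rank_info_alt, pvBisect, pvCutoffs, pvNames, PySem.List.pyGet?,
      PySem.List.pyIdx?, h20, show (5000:Int) ≤ xp by omega]
  · by_cases h10 : 10000 ≤ xp
    · simp [get_rank_info_alt, pvBisect, pvCutoffs, pvNames, PySem.List.pyGet?,
        PySem.List.pyIdx?, h20, h10, show (5000:Int) ≤ xp by omega]
    · by_cases h5 : 5000 ≤ xp
      · simp [get_rank_info_alt, pvBisect, pvCutoffs, pvNames, PySem.List.pyGet?,
          PySem.List.pyIdx?, h20, h10, h5]
      · by_cases h1 : 1000 ≤ xp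
        · simp [get_rank_info_alt, pvBisect, pvCutoffs, pvNames, PySem.List.pyGet?,
            PySem.List.pyIdx?, h20, h10, h5, h1]
        · by_cases h0 : 0 ≤ xp
          · simp [get_rank_info_alt, pvBisect, pvCutoffs, pvNames, PySem.List.pyGet?,
              PySem.List.pyIdx?, h20, h10, h5, h1, h0]
          · simp [get_rank_info_alt, pvBisect, pvCutoffs, pvNames, PySem.List.pyGet?,
              PySem.List.pyIdx?, h20, h10, h5, h1, h0]

-- ===== VERDICT (by name: the statement is the Claim_ definition above) =====
theorem get_rank_info_spec : Claim_equal_get_rank_info := by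
  intro xp _
  unfold Spec_get_rank_info
  rw [pvA_eval, pvB_eval]
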